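-- pv_equiv track=rewrite | github.com/shinderohit127/SciVis-2026-3D-Ocean-Circulation | notebooks/debug_grid3.py | find_transitions
-- ===== SOURCE A (Python) =====
-- def find_transitions(col_data):
--     """Find y-pixels where data transitions between land (0) and ocean (nonzero)."""
--     transitions = []
--     for i in range(1, len(col_data)):
--         was_land = col_data[i-1] == 0
--         is_land = col_data[i] == 0
--         if was_land != is_land:
--             kind = "land->ocean" if was_land else "ocean->land"
--             transitions.append((i, kind))
--     return transitions
-- ===== SOURCE B (Python) =====
-- def find_transitions(col_data):
--     """Find y-pixels where data transitions between land (0) and ocean (nonzero).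
--
--     Run-based scan: advance over each maximal run of equal land-status; every
--     run boundary after the first run is a transition, labelled by the previous
--     run's status (runs alternate, so previous status = not current status).
--     """
--     transitions = []
--     n = len(col_data)
--     i = 0
--     first = True
--     while i < n:
--         is_land = col_data[i] == 0
--         j = i + 1
--         while j < n and (col_data[j] == 0) == is_land:
--             j += 1
--         if not first:
--             kind = "land->ocean" if not is_land else "ocean->land"
--             transitions.append((i, kind))
--         first = False
--         i = j
--     return transitions
-- ===== Notes on version B (the rewrite author's own statement) =====
-- stated objective: alternative
-- what changed: Replaces the pairwise index loop (comparing col[i-1] with col[i] at every i) by a run-based scan that jumps over maximal runs of equal land-status and emits one transition per run boundary, labelled from the alternation of run statuses.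
import Mathlib
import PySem

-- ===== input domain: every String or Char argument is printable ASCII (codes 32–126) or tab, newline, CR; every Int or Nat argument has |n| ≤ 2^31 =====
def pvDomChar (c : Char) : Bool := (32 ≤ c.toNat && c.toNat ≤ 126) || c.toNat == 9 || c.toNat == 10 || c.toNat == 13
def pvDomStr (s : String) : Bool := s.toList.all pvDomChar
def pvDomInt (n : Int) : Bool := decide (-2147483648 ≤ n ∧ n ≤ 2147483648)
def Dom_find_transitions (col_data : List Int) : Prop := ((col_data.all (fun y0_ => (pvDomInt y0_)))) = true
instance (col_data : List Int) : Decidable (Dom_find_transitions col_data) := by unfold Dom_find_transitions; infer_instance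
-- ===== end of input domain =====

-- B replaces A's pairwise index loop by a run-based scan over maximal runs of
-- equal land-status (alternative decomposition, same asymptotic cost).

-- ===== PORT A =====
def find_transitions (col_data : List Int) : List (Int × String) :=
  (PySem.List.pyRange 1 (col_data.length : Int) 1).foldl
    (fun transitions i =>
      let was_land := PySem.List.pyGetD col_data (i - 1) 0 == 0
      let is_land := PySem.List.pyGetD col_data i 0 == 0
      if was_land != is_land then
        let kind := if was_land then "land->ocean" else "ocean->land"
        transitions ++ [(i, kind)]
      else transitions) []

-- ===== PORT B =====
-- inner while loop of Source B: length of the maximal prefix with land-status k, and the rest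
def spanRun (k : Bool) : List Int → Nat × List Int
  | [] => (0, [])
  | x :: xs =>
    if (x == 0) == k then
      let p := spanRun k xs
      (p.1 + 1, p.2)
    else (0, x :: xs)

-- termination helper for the outer loop (the rest of a run is no longer than the input)
theorem spanRun_snd_length_le (k : Bool) : ∀ l : List Int, (spanRun k l).2.length ≤ l.length := by
  intro l
  induction l with
  | nil => simp [spanRun]
  | cons x xs ih =>
    by_cases h : (x == 0) = k <;> simp [spanRun, h]
    omega

-- outer while loop of Source B
def altGo (idx : Int) (first : Bool) (l : List Int) : List (Int × String) :=
  match l with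
  | [] => []
  | x :: xs =>
    let k := x == 0
    let p := spanRun k xs
    (if first then [] else [(idx, if !k then "land->ocean" else "ocean->land")])
      ++ altGo (idx + ((p.1 + 1 : Nat) : Int)) false p.2
termination_by l.length
decreasing_by
  exact Nat.lt_succ_of_le (spanRun_snd_length_le _ xs)

def find_transitions_alt (col_data : List Int) : List (Int × String) :=
  altGo 0 true col_data

-- ===== PRECONDITION & SPEC =====
def Spec_find_transitions (col_data : List Int) (out : List (Int × String)) : Prop := out = find_transitions_alt col_data
instance (col_data : List Int) (out : List (Int × String)) : Decidable (Spec_find_transitions col_data out) := by unfold Spec_find_transitions; infer_instance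

-- ===== CLAIM (what is proved, stated in full; the proofs are below) =====
def Claim_equal_find_transitions : Prop := ∀ (col_data : List Int), Dom_find_transitions col_data → Spec_find_transitions col_data (find_transitions col_data)

-- ===== LEMMAS AND PROOFS =====

-- common intermediate form: structural pairwise scan carrying the previous land-status
def pairAux : Int → Bool → List Int → List (Int × String)
  | _, _, [] => []
  | j, prev, y :: ys =>
    (if prev != (y == 0) then [(j, if prev then "land->ocean" else "ocean->land")] else [])
      ++ pairAux (j + 1) (y == 0) ys

theorem pairAux_run (xs : List Int) : ∀ (j : Int) (k : Bool),
    pairAux j k xs = pairAux (j + ((spanRun k xs).1 : Int)) k (spanRun k xs).2 := by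
  induction xs with
  | nil => intro j k; simp [spanRun]
  | cons y ys ih =>
    intro j k
    by_cases h : (y == 0) = k
    · have hs : spanRun k (y :: ys) = ((spanRun k ys).1 + 1, (spanRun k ys).2) := by
        simp [spanRun, h]
      have hp : pairAux j k (y :: ys) = pairAux (j + 1) k ys := by
        simp [pairAux, h, bne]
      rw [hs, hp, ih (j + 1) k]
      congr 1
      push_cast
      ring
    · simp [spanRun, h]

theorem spanRun_head (k : Bool) : ∀ (xs : List Int) (y : Int) (ys : List Int),
    (spanRun k xs).2 = y :: ys → (y == 0) ≠ k := by
  intro xs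
  induction xs with
  | nil => intro y ys h; simp [spanRun] at h
  | cons x l ih =>
    intro y ys h
    by_cases hx : (x == 0) = k
    · have hs : spanRun k (x :: l) = ((spanRun k l).1 + 1, (spanRun k l).2) := by
        simp [spanRun, hx]
      rw [hs] at h
      exact ih y ys h
    · have hs : spanRun k (x :: l) = (0, x :: l) := by simp [spanRun, hx]
      rw [hs] at h
      simp at h
      obtain ⟨h1, h2⟩ := h
      subst h1
      exact hx

theorem altGo_cons (j : Int) (x : Int) (l : List Int) :
    altGo j false (x :: l) =
      (j, if !(x == 0) then "land->ocean" else "ocean->land")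
        :: altGo (j + (((spanRun (x == 0) l).1 + 1 : Nat) : Int)) false (spanRun (x == 0) l).2 := by
  rw [altGo]
  simp

theorem altGo_eq_pairAux : ∀ (n : Nat) (xs : List Int), xs.length ≤ n → ∀ (j : Int) (k : Bool),
    (∀ y ys, xs = y :: ys → (y == 0) ≠ k) → altGo j false xs = pairAux j k xs := by
  intro n
  induction n with
  | zero =>
    intro xs hlen j k _
    have : xs = [] := List.eq_nil_of_length_eq_zero (Nat.le_zero.mp hlen)
    subst this
    rw [altGo]
    simp [pairAux]
  | succ n ih =>
    intro xs hlen j k hhead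
    match xs with
    | [] =>
      rw [altGo]
      simp [pairAux]
    | x :: l =>
      have hk : (x == 0) ≠ k := hhead x l rfl
      have hk' : k = !(x == 0) := by
        cases hxz : (x == 0) <;> cases hkk : k <;> simp_all
      have harith : j + (((spanRun (x == 0) l).1 + 1 : Nat) : Int)
          = j + 1 + ((spanRun (x == 0) l).1 : Int) := by push_cast; ring
      rw [altGo_cons, harith]
      rw [ih (spanRun (x == 0) l).2
        (by have := spanRun_snd_length_le (x == 0) l; simp at hlen; omega)
        (j + 1 + ((spanRun (x == 0) l).1 : Int)) (x == 0) (spanRun_head (x == 0) l)]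
      have hpa : pairAux j k (x :: l)
          = (j, if k then "land->ocean" else "ocean->land") :: pairAux (j + 1) (x == 0) l := by
        rw [hk']
        cases hxz : (x == 0) <;> simp [pairAux, hxz, bne]
      rw [hpa, pairAux_run l (j + 1) (x == 0)]
      rw [hk']

theorem alt_eq_pairAux (x : Int) (xs : List Int) :
    find_transitions_alt (x :: xs) = pairAux 1 (x == 0) xs := by
  rw [find_transitions_alt, altGo]
  have harith : (0 : Int) + (((spanRun (x == 0) xs).1 + 1 : Nat) : Int)
      = 1 + ((spanRun (x == 0) xs).1 : Int) := by push_cast; ring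
  simp only [harith]
  rw [altGo_eq_pairAux (spanRun (x == 0) xs).2.length _ le_rfl
      (1 + ((spanRun (x == 0) xs).1 : Int)) (x == 0) (spanRun_head (x == 0) xs)]
  rw [pairAux_run xs 1 (x == 0)]
  simp

-- A's fold, peeled over the suffix of the column
theorem a_fold (col : List Int) : ∀ (tail pre : List Int) (x : Int), col = pre ++ x :: tail →
    ∀ acc : List (Int × String),
    (PySem.List.pyRange ((pre.length : Int) + 1) (col.length : Int) 1).foldl
      (fun transitions i =>
        let was_land := PySem.List.pyGetD col (i - 1) 0 == 0
        let is_land := PySem.List.pyGetD col i 0 == 0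
        if was_land != is_land then
          let kind := if was_land then "land->ocean" else "ocean->land"
          transitions ++ [(i, kind)]
        else transitions) acc
      = acc ++ pairAux ((pre.length : Int) + 1) (x == 0) tail := by
  intro tail
  induction tail with
  | nil =>
    intro pre x hcol acc
    subst hcol
    rw [PySem.List.pyRange_one_eq_nil (by simp)]
    simp [pairAux]
  | cons y tail ih =>
    intro pre x hcol acc
    subst hcol
    have hlt : (pre.length : Int) + 1 < ((pre ++ x :: y :: tail).length : Int) := by
      simp
    rw [PySem.List.pyRange_one_cons hlt, List.foldl_cons]
    have hget1 : PySem.List.pyGetD (pre ++ x :: y :: tail) ((pre.length : Int) + 1 - 1) 0 = x := by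
      have : (pre.length : Int) + 1 - 1 = (pre.length : Int) := by ring
      rw [this, PySem.List.pyGetD_natCast]
      simp [List.getD]
    have hget2 : PySem.List.pyGetD (pre ++ x :: y :: tail) ((pre.length : Int) + 1) 0 = y := by
      have h1 : (pre.length : Int) + 1 = ((pre ++ [x]).length : Nat) := by simp
      rw [h1, PySem.List.pyGetD_natCast]
      have : pre ++ x :: y :: tail = (pre ++ [x]) ++ y :: tail := by simp
      rw [this]
      simp [List.getD]
    simp only [hget1, hget2]
    have ihx := ih (pre ++ [x]) y (by simp) 
    have hcast : (((pre ++ [x]).length : Nat) : Int) + 1 = (pre.length : Int) + 1 + 1 := by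
      simp
    rw [hcast] at ihx
    rw [ihx]
    have hpa : pairAux ((pre.length : Int) + 1) (x == 0) (y :: tail)
        = (if (x == 0) != (y == 0) then
            [(((pre.length : Int) + 1), if (x == 0) then "land->ocean" else "ocean->land")]
          else [])
          ++ pairAux ((pre.length : Int) + 1 + 1) (y == 0) tail := by
      simp [pairAux]
    rw [hpa]
    by_cases hc : ((x == 0) != (y == 0)) = true
    · simp only [hc]
      simp
    · simp only [hc]
      simp at hc
      simp

-- ===== VERDICT (by name: the statement is the Claim_ definition above) =====
theorem find_transitions_spec : Claim_equal_find_transitions := by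
  intro col _
  unfold Spec_find_transitions
  match col with
  | [] =>
    rw [find_transitions_alt]
    rw [show altGo 0 true ([] : List Int) = [] from by rw [altGo]]
    rw [find_transitions]
    simp [PySem.List.pyRange_one_eq_nil]
  | x :: xs =>
    rw [alt_eq_pairAux]
    rw [find_transitions]
    have := a_fold (x :: xs) xs [] x rfl []
    simpa using this
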